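-- pv_equiv track=rewrite | github.com/cisco-en-programmability/dnacenter-ansible | plugins/modules/device_credential_intent.py | get_snmpV3_params
-- ===== SOURCE A (Python) =====
-- def get_snmpV3_params(snmpV3Details):
--     """
--     Format the snmpV3 parameters for the snmpV3 credential configuration in Cisco DNA Center.
--
--     Parameters:
--         snmpV3Details (list of dict) - Cisco DNA Center details containing snmpV3 Credentials.
--
--     Returns:
--         snmpV3 (list of dict) - Processed snmpV3 credential
--         data in the format suitable for the Cisco DNA Center config.
--     """
--
--     snmpV3 = []
--     for item in snmpV3Details:
--         if item is None:
--             snmpV3.append(None)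
--         else:
--             value = {
--                 "username": item.get("username"),
--                 "description": item.get("description"),
--                 "snmpMode": item.get("snmpMode"),
--                 "id": item.get("id"),
--             }
--             if value.get("snmpMode") == "AUTHNOPRIV":
--                 value["authType"] = item.get("authType")
--             elif value.get("snmpMode") == "AUTHPRIV":
--                 value.update(
--                     {
--                         "authType": item.get("authType"),
--                         "privacyType": item.get("privacyType"),
--                     }
--                 )
--             snmpV3.append(value)
--     return snmpV3
-- ===== SOURCE B (Python) =====
-- # Staged-passes rewrite: pass 1 builds every base dict; pass 2 adds authType to
-- # all auth modes; pass 3 adds privacyType to AUTHPRIV entries (objective: alternative).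
-- def get_snmpV3_params(snmpV3Details):
--     out = [
--         None if item is None else {
--             "username": item.get("username"),
--             "description": item.get("description"),
--             "snmpMode": item.get("snmpMode"),
--             "id": item.get("id"),
--         }
--         for item in snmpV3Details
--     ]
--     for src, dst in zip(snmpV3Details, out):
--         if dst is not None and dst["snmpMode"] in ("AUTHNOPRIV", "AUTHPRIV"):
--             dst["authType"] = src.get("authType")
--     for src, dst in zip(snmpV3Details, out):
--         if dst is not None and dst["snmpMode"] == "AUTHPRIV":
--             dst["privacyType"] = src.get("privacyType")
--     return out
-- ===== Notes on version B (the rewrite author's own statement) =====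
-- stated objective: alternative
-- what changed: Replaces A's single accumulator loop with its per-item if/elif mutation by three staged passes over the whole list: one building all base dicts, a second zip-pass adding authType to every auth mode, a third zip-pass adding privacyType to AUTHPRIV entries.
import Mathlib
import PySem

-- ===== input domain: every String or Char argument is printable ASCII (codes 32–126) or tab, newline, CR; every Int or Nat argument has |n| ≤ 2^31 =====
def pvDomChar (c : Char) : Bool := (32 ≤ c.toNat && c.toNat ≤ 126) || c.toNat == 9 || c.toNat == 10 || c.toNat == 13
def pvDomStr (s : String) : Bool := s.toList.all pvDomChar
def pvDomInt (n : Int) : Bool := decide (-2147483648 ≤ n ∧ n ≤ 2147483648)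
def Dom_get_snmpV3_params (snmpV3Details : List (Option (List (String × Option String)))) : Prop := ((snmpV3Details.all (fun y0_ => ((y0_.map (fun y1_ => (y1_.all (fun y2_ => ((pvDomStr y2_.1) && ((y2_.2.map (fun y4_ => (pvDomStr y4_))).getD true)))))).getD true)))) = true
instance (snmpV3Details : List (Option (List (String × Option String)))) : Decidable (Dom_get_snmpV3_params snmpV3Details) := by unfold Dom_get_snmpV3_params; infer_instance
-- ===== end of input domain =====

-- B replaces A's single accumulator loop (if/elif mutation per item) by three
-- staged passes: build all base dicts, then add authType, then privacyType
-- (objective: alternative). Return-value equivalence only; no mutation of the input.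

-- ===== PORT A =====
-- A's loop: accumulator list, per item build the 4-key dict literal, then
-- mutate it in the if/elif chain before appending.  item.get(k) → Dict.getD ⟨item⟩ k none.
def get_snmpV3_params (snmpV3Details : List (Option (List (String × Option String)))) : List (Option (List (String × Option String))) :=
  snmpV3Details.foldl (fun snmpV3 item =>
    match item with
    | none => snmpV3 ++ [none]
    | some it =>
      let d : PySem.Dict String (Option String) := ⟨it⟩
      let value : PySem.Dict String (Option String) :=
        ⟨[("username", d.getD "username" none),
          ("description", d.getD "description" none),
          ("snmpMode", d.getD "snmpMode" none),
          ("id", d.getD "id" none)]⟩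
      let value :=
        if value.getD "snmpMode" none == some "AUTHNOPRIV" then
          value.insert "authType" (d.getD "authType" none)
        else if value.getD "snmpMode" none == some "AUTHPRIV" then
          -- value.update({...}) = two inserts in order
          (value.insert "authType" (d.getD "authType" none)).insert "privacyType" (d.getD "privacyType" none)
        else value
      snmpV3 ++ [some value.items]) []

-- ===== PORT B =====
-- pass 1 of Source B: the list comprehension building every base dict
def pvPass1 (snmpV3Details : List (Option (List (String × Option String)))) :
    List (Option (PySem.Dict String (Option String))) :=
  snmpV3Details.map (fun item =>
    item.map (fun it =>
      let d : PySem.Dict String (Option String) := ⟨it⟩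
      (⟨[("username", d.getD "username" none),
         ("description", d.getD "description" none),
         ("snmpMode", d.getD "snmpMode" none),
         ("id", d.getD "id" none)]⟩ : PySem.Dict String (Option String))))

-- pass 2: for src, dst in zip(...): add authType when snmpMode is an auth mode.
-- dst["snmpMode"] is always present in the base dict, so getD is exact here;
-- src is not None whenever dst is (zip is parallel), the none case is unreachable.
def pvPass2 (snmpV3Details : List (Option (List (String × Option String))))
    (out : List (Option (PySem.Dict String (Option String)))) :
    List (Option (PySem.Dict String (Option String))) :=
  (snmpV3Details.zip out).map (fun p =>
    match p.2 with
    | none => none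
    | some dst =>
      if [some "AUTHNOPRIV", some "AUTHPRIV"].contains (dst.getD "snmpMode" none) then
        some (dst.insert "authType"
          (match p.1 with
           | some it => (⟨it⟩ : PySem.Dict String (Option String)).getD "authType" none
           | none => none))
      else some dst)

-- pass 3: same shape, privacyType for AUTHPRIV.
def pvPass3 (snmpV3Details : List (Option (List (String × Option String))))
    (out : List (Option (PySem.Dict String (Option String)))) :
    List (Option (PySem.Dict String (Option String))) :=
  (snmpV3Details.zip out).map (fun p =>
    match p.2 with
    | none => none
    | some dst =>
      if dst.getD "snmpMode" none == some "AUTHPRIV" then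
        some (dst.insert "privacyType"
          (match p.1 with
           | some it => (⟨it⟩ : PySem.Dict String (Option String)).getD "privacyType" none
           | none => none))
      else some dst)

def get_snmpV3_params_alt (snmpV3Details : List (Option (List (String × Option String)))) : List (Option (List (String × Option String))) :=
  (pvPass3 snmpV3Details (pvPass2 snmpV3Details (pvPass1 snmpV3Details))).map
    (fun o => o.map PySem.Dict.items)

-- ===== PRECONDITION & SPEC =====
def Spec_get_snmpV3_params (snmpV3Details : List (Option (List (String × Option String)))) (out : List (Option (List (String × Option String)))) : Prop := out = get_snmpV3_params_alt snmpV3Details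
instance (snmpV3Details : List (Option (List (String × Option String)))) (out : List (Option (List (String × Option String)))) : Decidable (Spec_get_snmpV3_params snmpV3Details out) := by unfold Spec_get_snmpV3_params; infer_instance

-- ===== CLAIM (what is proved, stated in full; the proofs are below) =====
def Claim_equal_get_snmpV3_params : Prop := ∀ (snmpV3Details : List (Option (List (String × Option String)))), Dom_get_snmpV3_params snmpV3Details → Spec_get_snmpV3_params snmpV3Details (get_snmpV3_params snmpV3Details)

-- ===== LEMMAS AND PROOFS =====

-- proof-only name for A's per-item computation
def pvItemA (it : List (String × Option String)) : List (String × Option String) :=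
  let d : PySem.Dict String (Option String) := ⟨it⟩
  let value : PySem.Dict String (Option String) :=
    ⟨[("username", d.getD "username" none),
      ("description", d.getD "description" none),
      ("snmpMode", d.getD "snmpMode" none),
      ("id", d.getD "id" none)]⟩
  let value :=
    if value.getD "snmpMode" none == some "AUTHNOPRIV" then
      value.insert "authType" (d.getD "authType" none)
    else if value.getD "snmpMode" none == some "AUTHPRIV" then
      (value.insert "authType" (d.getD "authType" none)).insert "privacyType" (d.getD "privacyType" none)
    else value
  value.items

-- B's three stages composed on a single item
def pvItemB (it : List (String × Option String)) : List (String × Option String) :=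
  let d : PySem.Dict String (Option String) := ⟨it⟩
  let base : PySem.Dict String (Option String) :=
    ⟨[("username", d.getD "username" none),
      ("description", d.getD "description" none),
      ("snmpMode", d.getD "snmpMode" none),
      ("id", d.getD "id" none)]⟩
  let s2 :=
    if [some "AUTHNOPRIV", some "AUTHPRIV"].contains (base.getD "snmpMode" none) then
      base.insert "authType" (d.getD "authType" none)
    else base
  let s3 :=
    if s2.getD "snmpMode" none == some "AUTHPRIV" then
      s2.insert "privacyType" (d.getD "privacyType" none)
    else s2
  s3.items

theorem pv_item_eq (it : List (String × Option String)) : pvItemA it = pvItemB it := by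
  unfold pvItemA pvItemB
  simp only []
  generalize hm : (PySem.Dict.mk it).getD "snmpMode" none = m
  simp only [PySem.Dict.getD, PySem.Dict.get?] at hm
  rcases m with _ | s
  · simp [PySem.Dict.getD, PySem.Dict.get?]
  · by_cases h1 : s = "AUTHNOPRIV"
    · subst h1
      simp [PySem.Dict.getD, PySem.Dict.get?, PySem.Dict.insert]
    · by_cases h2 : s = "AUTHPRIV"
      · subst h2
        simp [PySem.Dict.getD, PySem.Dict.get?, PySem.Dict.insert]
      · simp [PySem.Dict.getD, PySem.Dict.get?, h1, h2]

-- B's staged passes step one element at a time: each pass maps the head of the zip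
theorem pv_alt_none (xs : List (Option (List (String × Option String)))) :
    get_snmpV3_params_alt (none :: xs) = none :: get_snmpV3_params_alt xs := by
  rfl

theorem pv_alt_some (xs : List (Option (List (String × Option String)))) (it : List (String × Option String)) :
    get_snmpV3_params_alt (some it :: xs) = some (pvItemB it) :: get_snmpV3_params_alt xs := by
  show _ :: _ = _ :: _
  congr 1
  unfold pvItemB
  simp only [Option.map_some]
  generalize hm : (PySem.Dict.mk it).getD "snmpMode" none = m
  simp only [PySem.Dict.getD, PySem.Dict.get?] at hm
  rcases m with _ | s
  · simp [PySem.Dict.getD, PySem.Dict.get?]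
  · by_cases h1 : s = "AUTHNOPRIV"
    · subst h1
      simp [PySem.Dict.getD, PySem.Dict.get?, PySem.Dict.insert]
    · by_cases h2 : s = "AUTHPRIV"
      · subst h2
        simp [PySem.Dict.getD, PySem.Dict.get?, PySem.Dict.insert]
      · simp [PySem.Dict.getD, PySem.Dict.get?, h1, h2]
-- hence B's three passes are the elementwise map of the composed per-item stages
theorem pv_alt_eq (xs : List (Option (List (String × Option String)))) :
    get_snmpV3_params_alt xs = xs.map (fun item => item.map pvItemB) := by
  induction xs with
  | nil => rfl
  | cons x xs ih =>
    rcases x with _ | it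
    · rw [pv_alt_none, ih]; rfl
    · rw [pv_alt_some, ih]; rfl

-- A's fold with accumulator is the elementwise map of pvItemA
theorem pv_fold_eq (xs : List (Option (List (String × Option String))))
    (acc : List (Option (List (String × Option String)))) :
    xs.foldl (fun snmpV3 item =>
      match item with
      | none => snmpV3 ++ [none]
      | some it => snmpV3 ++ [some (pvItemA it)]) acc
      = acc ++ xs.map (fun item => item.map pvItemA) := by
  induction xs generalizing acc with
  | nil => simp
  | cons x xs ih =>
    rcases x with _ | it <;> simp only [List.foldl_cons] <;> rw [ih] <;> simp

-- ===== VERDICT (by name: the statement is the Claim_ definition above) =====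
theorem get_snmpV3_params_spec : Claim_equal_get_snmpV3_params := by
  intro xs _
  show get_snmpV3_params xs = get_snmpV3_params_alt xs
  have hA : get_snmpV3_params xs =
      xs.foldl (fun snmpV3 item =>
        match item with
        | none => snmpV3 ++ [none]
        | some it => snmpV3 ++ [some (pvItemA it)]) [] := rfl
  rw [hA, pv_fold_eq, pv_alt_eq]
  simp only [List.nil_append]
  exact List.map_congr_left (fun a _ => congrArg (Option.map · a) (funext pv_item_eq))
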